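-- pv_equiv track=rewrite | github.com/HadrielTzuk/tip-marketplace | Integrations/QRadar/ConnectorsScripts/QRadar Correlations Events Connector.py | calculate_case_priority_by_magnitude
-- ===== SOURCE A (Python) =====
-- def calculate_case_priority_by_magnitude(events_list):
--     """
--     Calculate Siemplify priority.
--     :param events_list: list of dicts when each dict is an event {list}
--     :return: case priority {integer}
--     """
--     # Get max magnitude.
--     max_magnitude = 0
--     for event in events_list:
--         if event.get('magnitude', max_magnitude) > max_magnitude:
--             max_magnitude = event.get('magnitude', max_magnitude)
--
--     # Match magnitude to Siemplify value.
--     if max_magnitude < 2: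
--         return -1
--     elif max_magnitude < 4:
--         return 40
--     elif max_magnitude < 6:
--         return 60
--     elif max_magnitude < 8:
--         return 80
--     return 100
-- ===== SOURCE B (Python) =====
-- # Per-event classification then max over priorities: each event's magnitude is
-- # mapped to its Siemplify priority by a closed arithmetic formula (no cascade,
-- # no max-magnitude pass), and the case priority is the max of those, default -1.
-- # Correct because the priority function is monotone in magnitude, so
-- # priority(max magnitude) = max of per-event priorities.
--
-- def _priority(m):
--     return -1 if m < 2 else 20 * (min(m, 8) // 2 + 1)
--
--
-- def calculate_case_priority_by_magnitude(events_list):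
--     return max((_priority(e.get('magnitude', 0)) for e in events_list), default=-1)
-- ===== Notes on version B (the rewrite author's own statement) =====
-- stated objective: alternative
-- what changed: Instead of scanning for the max magnitude and pushing it through a threshold cascade, B maps each event's magnitude to its priority with a closed arithmetic formula (20*(min(m,8)//2+1), -1 below 2) and returns the max of those priorities (default -1); correct since the priority function is monotone.
import Mathlib
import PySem

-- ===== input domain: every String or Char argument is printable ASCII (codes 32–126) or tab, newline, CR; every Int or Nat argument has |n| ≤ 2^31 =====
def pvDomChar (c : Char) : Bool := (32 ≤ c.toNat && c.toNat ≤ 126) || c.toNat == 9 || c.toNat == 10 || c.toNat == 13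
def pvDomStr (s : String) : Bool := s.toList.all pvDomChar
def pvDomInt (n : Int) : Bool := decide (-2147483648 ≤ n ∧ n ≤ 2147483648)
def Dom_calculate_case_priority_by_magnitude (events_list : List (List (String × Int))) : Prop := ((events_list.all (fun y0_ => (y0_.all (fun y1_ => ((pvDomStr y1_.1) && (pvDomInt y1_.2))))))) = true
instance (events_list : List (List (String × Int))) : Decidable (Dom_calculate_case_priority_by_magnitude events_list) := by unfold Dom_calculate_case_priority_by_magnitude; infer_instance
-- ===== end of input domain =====

-- B classifies each event's magnitude with a closed arithmetic priority formula and
-- returns the max of those priorities (default -1), instead of A's max-magnitude scan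
-- followed by a threshold cascade; equal since the priority map is monotone.

-- ===== PORT A =====
def calculate_case_priority_by_magnitude (events_list : List (List (String × Int))) : Int :=
  let max_magnitude : Int := events_list.foldl
    (fun max_magnitude event =>
      if PySem.Dict.getD ⟨event⟩ "magnitude" max_magnitude > max_magnitude then
        PySem.Dict.getD ⟨event⟩ "magnitude" max_magnitude
      else max_magnitude) 0
  if max_magnitude < 2 then -1
  else if max_magnitude < 4 then 40
  else if max_magnitude < 6 then 60
  else if max_magnitude < 8 then 80
  else 100

-- ===== PORT B =====
def pvPriority (m : Int) : Int :=
  if m < 2 then -1 else 20 * (PySem.Int.floordiv (min m 8) 2 + 1)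

def calculate_case_priority_by_magnitude_alt (events_list : List (List (String × Int))) : Int :=
  (PySem.List.max?
    (events_list.map (fun e => pvPriority (PySem.Dict.getD ⟨e⟩ "magnitude" 0)))
    (fun x => x)).getD (-1)

-- ===== PRECONDITION & SPEC =====
def Spec_calculate_case_priority_by_magnitude (events_list : List (List (String × Int))) (out : Int) : Prop := out = calculate_case_priority_by_magnitude_alt events_list
instance (events_list : List (List (String × Int))) (out : Int) : Decidable (Spec_calculate_case_priority_by_magnitude events_list out) := by unfold Spec_calculate_case_priority_by_magnitude; infer_instance

-- ===== CLAIM =====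
def Claim_equal_calculate_case_priority_by_magnitude : Prop := ∀ (events_list : List (List (String × Int))), Dom_calculate_case_priority_by_magnitude events_list → Spec_calculate_case_priority_by_magnitude events_list (calculate_case_priority_by_magnitude events_list)

-- ===== LEMMAS AND PROOFS =====

-- A's cascade, as a function of the max magnitude (proof-side helper only).
def pvCascade (m : Int) : Int :=
  if m < 2 then -1 else if m < 4 then 40 else if m < 6 then 60
  else if m < 8 then 80 else 100

-- B's arithmetic formula agrees with A's cascade on every magnitude.
theorem pvPriority_eq_cascade (m : Int) : pvPriority m = pvCascade m := by
  unfold pvPriority pvCascade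
  by_cases h1 : m < 2
  · rw [if_pos h1, if_pos h1]
  by_cases h2 : m < 4
  · have hmin : min m 8 = m := by omega
    have hd : PySem.Int.floordiv m 2 = 1 := by
      rw [PySem.Int.floordiv_eq_iff_of_pos (by omega)]; omega
    rw [if_neg h1, if_neg h1, if_pos h2, hmin, hd]; norm_num
  by_cases h3 : m < 6
  · have hmin : min m 8 = m := by omega
    have hd : PySem.Int.floordiv m 2 = 2 := by
      rw [PySem.Int.floordiv_eq_iff_of_pos (by omega)]; omega
    rw [if_neg h1, if_neg h1, if_neg h2, if_pos h3, hmin, hd]; norm_num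
  by_cases h4 : m < 8
  · have hmin : min m 8 = m := by omega
    have hd : PySem.Int.floordiv m 2 = 3 := by
      rw [PySem.Int.floordiv_eq_iff_of_pos (by omega)]; omega
    rw [if_neg h1, if_neg h1, if_neg h2, if_neg h3, if_pos h4, hmin, hd]; norm_num
  · have hmin : min m 8 = 8 := by omega
    have hd : PySem.Int.floordiv 8 2 = 4 := by decide
    rw [if_neg h1, if_neg h1, if_neg h2, if_neg h3, if_neg h4, hmin, hd]; norm_num

theorem pvCascade_mono {a b : Int} (h : a ≤ b) : pvCascade a ≤ pvCascade b := by
  unfold pvCascade; split_ifs <;> omega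

theorem pvPriority_max (a b : Int) :
    pvPriority (max a b) = max (pvPriority a) (pvPriority b) := by
  simp only [pvPriority_eq_cascade]
  rcases le_total a b with h | h
  · rw [max_eq_right h, max_eq_right (pvCascade_mono h)]
  · rw [max_eq_left h, max_eq_left (pvCascade_mono h)]

theorem pvPriority_ge (m : Int) : -1 ≤ pvPriority m := by
  rw [pvPriority_eq_cascade]; unfold pvCascade; split_ifs <;> omega

-- priority of a running max = running max of priorities.
theorem pvPriority_foldl (t : List Int) (a : Int) :
    pvPriority (t.foldl max a) = (t.map pvPriority).foldl max (pvPriority a) := by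
  induction t generalizing a with
  | nil => rfl
  | cons x t ih => simp only [List.foldl_cons, List.map_cons]; rw [ih, pvPriority_max]

-- A's loop body: take the current max, or the event's magnitude if larger.
theorem pvStep_eq (ev : List (String × Int)) (m : Int) :
    (if PySem.Dict.getD ⟨ev⟩ "magnitude" m > m then PySem.Dict.getD ⟨ev⟩ "magnitude" m else m)
      = max m (match PySem.Dict.get? (⟨ev⟩ : PySem.Dict String Int) "magnitude" with
               | some v => v | none => m) := by
  simp only [PySem.Dict.getD]
  cases h : PySem.Dict.get? (⟨ev⟩ : PySem.Dict String Int) "magnitude" with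
    | none => simp
    | some v => simp; omega

-- A's running-max loop computes the fold of `max` over the 0-defaulted magnitudes.
theorem pvFold_eq (el : List (List (String × Int))) (m : Int) (hm : 0 ≤ m) :
    el.foldl (fun max_magnitude event =>
        if PySem.Dict.getD ⟨event⟩ "magnitude" max_magnitude > max_magnitude then
          PySem.Dict.getD ⟨event⟩ "magnitude" max_magnitude
        else max_magnitude) m
      = (el.map (fun event => PySem.Dict.getD ⟨event⟩ "magnitude" 0)).foldl max m := by
  induction el generalizing m with
  | nil => rfl
  | cons ev t ih =>
    simp only [List.foldl_cons, List.map_cons]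
    rw [pvStep_eq]
    have hstep : (max m (match PySem.Dict.get? (⟨ev⟩ : PySem.Dict String Int) "magnitude" with
               | some v => v | none => m))
        = max m (PySem.Dict.getD ⟨ev⟩ "magnitude" 0) := by
      simp only [PySem.Dict.getD]
      cases h : PySem.Dict.get? (⟨ev⟩ : PySem.Dict String Int) "magnitude" with
      | none => simp; omega
      | some v => simp
    rw [hstep, ih _ (le_trans hm (le_max_left _ _))]

-- kernel of the equivalence: cascade of the running max = B's max of priorities.
theorem pvKernel (vals : List Int) :
    pvCascade (vals.foldl max 0)
      = (PySem.List.max? (vals.map pvPriority) (fun x => x)).getD (-1) := by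
  cases vals with
  | nil => decide
  | cons x t =>
    simp only [List.map_cons, PySem.List.max?_id_cons, Option.getD_some, List.foldl_cons]
    rw [← pvPriority_eq_cascade, pvPriority_foldl, pvPriority_max]
    have h0 : pvPriority 0 = -1 := by decide
    rw [h0, max_eq_right (pvPriority_ge x)]

-- ===== VERDICT =====
theorem calculate_case_priority_by_magnitude_spec : Claim_equal_calculate_case_priority_by_magnitude := by
  intro el _
  show calculate_case_priority_by_magnitude el = calculate_case_priority_by_magnitude_alt el
  simp only [calculate_case_priority_by_magnitude, calculate_case_priority_by_magnitude_alt]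
  rw [pvFold_eq el 0 le_rfl]
  have := pvKernel (el.map (fun event => PySem.Dict.getD ⟨event⟩ "magnitude" 0))
  rw [List.map_map] at this
  simp only [Function.comp_def] at this
  rw [← this]
  rfl
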